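-- pv_equiv track=rewrite | github.com/wyk18703232953/myResearch | codeComplex/data copy/filteredData/python/logn/python_logn_0194.py | hnbhai_param
-- ===== SOURCE A (Python) =====
-- def hnbhai_param(n, s):
--     low = s
--     high = n + 1
--     ans_local = n + 1
--     while low <= high:
--         mid = (low + high) // 2
--         ss = sum(int(ch) for ch in str(mid))
--         if mid - ss < s:
--             low = mid + 1
--
--         else:
--             ans_local = mid
--             high = mid - 1
--     return n - ans_local + 1
-- ===== SOURCE B (Python) =====
-- def hnbhai_param(n, s):
--     # mid - digitsum(mid) is non-decreasing, so instead of binary searching,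
--     # walk forward from s to the first t with t - digitsum(t) >= s (at most
--     # ~9*len(str(t)) steps, since digitsum is that small) and count the rest.
--     t = s
--     while t <= n and t - sum(int(ch) for ch in str(t)) < s:
--         t += 1
--     return n - t + 1 if t <= n else 0
-- ===== Notes on version B (the rewrite author's own statement) =====
-- stated objective: simpler
-- what changed: Replaced the low/high/ans binary search with a short forward walk from s to the first t with t - digitsum(t) >= s (monotone threshold), returning the closed-form count n - t + 1 (0 if none).
import Mathlib
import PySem

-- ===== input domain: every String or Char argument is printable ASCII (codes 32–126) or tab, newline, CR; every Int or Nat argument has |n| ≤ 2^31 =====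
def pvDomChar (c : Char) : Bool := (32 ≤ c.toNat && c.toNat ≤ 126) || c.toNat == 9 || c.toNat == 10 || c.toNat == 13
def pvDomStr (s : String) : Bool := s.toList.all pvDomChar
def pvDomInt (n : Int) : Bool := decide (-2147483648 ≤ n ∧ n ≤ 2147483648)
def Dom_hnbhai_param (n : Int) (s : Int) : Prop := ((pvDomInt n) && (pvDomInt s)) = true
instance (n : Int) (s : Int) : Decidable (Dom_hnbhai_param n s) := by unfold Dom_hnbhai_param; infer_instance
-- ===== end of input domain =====

-- B replaces A's binary search by a short forward walk to the first threshold
-- point and a closed-form count (objective: simpler).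

-- ===== PORT A =====
-- sum(int(ch) for ch in str(mid)); both Pythons contain this exact expression.
-- int(ch) is PySem.Int.ofChars? [ch]; `.getD 0` is only reached where Python
-- raises ValueError (the '-' of a negative mid), which Pre_ excludes.
def pyDigitSum (m : Int) : Int :=
  ((PySem.Int.toChars m).map (fun c => (PySem.Int.ofChars? [c]).getD 0)).sum

-- the while-loop of A, state (low, high, ans_local)
def hpGo (s low high ans : Int) : Int :=
  if h : low ≤ high then
    let mid := PySem.Int.floordiv (low + high) 2
    if mid - pyDigitSum mid < s then hpGo s (mid + 1) high ans
    else hpGo s low (mid - 1) mid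
  else ans
termination_by (high + 1 - low).toNat
decreasing_by
  · have hm : PySem.Int.floordiv (low + high) 2 = (low + high) / 2 :=
      PySem.Int.floordiv_eq_ediv_of_pos (by norm_num)
    rw [hm]; omega
  · have hm : PySem.Int.floordiv (low + high) 2 = (low + high) / 2 :=
      PySem.Int.floordiv_eq_ediv_of_pos (by norm_num)
    rw [hm]; omega

def hnbhai_param (n : Int) (s : Int) : Int :=
  n - hpGo s s (n + 1) (n + 1) + 1

-- ===== PORT B =====
-- the while-loop of B: walk t forward while t <= n and t - digitsum(t) < s
def altGo (n s t : Int) : Int :=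
  if h : t ≤ n ∧ t - pyDigitSum t < s then altGo n s (t + 1) else t
termination_by (n + 1 - t).toNat
decreasing_by omega

def hnbhai_param_alt (n : Int) (s : Int) : Int :=
  let t := altGo n s s
  if t ≤ n then n - t + 1 else 0

-- ===== PRECONDITION & SPEC =====
-- Pre_ excludes s < 0 with s ≤ n+1: there A's loop always drives mid negative
-- and int('-') raises ValueError (B raises the same way for s < 0, s ≤ n).
def Pre_hnbhai_param (n : Int) (s : Int) : Prop := 0 ≤ s ∨ n + 1 < s
instance (n : Int) (s : Int) : Decidable (Pre_hnbhai_param n s) := by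
  unfold Pre_hnbhai_param; infer_instance

def pvWitness_hnbhai_param : Int × Int := (10, 3)

def Spec_hnbhai_param (n : Int) (s : Int) (out : Int) : Prop := out = hnbhai_param_alt n s
instance (n : Int) (s : Int) (out : Int) : Decidable (Spec_hnbhai_param n s out) := by
  unfold Spec_hnbhai_param; infer_instance

-- ===== CLAIM (what is proved, stated in full; the proofs are below) =====
def Claim_equal_hnbhai_param : Prop :=
  ∀ (n : Int) (s : Int), Dom_hnbhai_param n s → Pre_hnbhai_param n s →
    Spec_hnbhai_param n s (hnbhai_param n s)

-- ===== LEMMAS AND PROOFS =====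

-- one-step unfolding of A's loop with the `let` inlined
lemma hpGo_eq (s low high ans : Int) : hpGo s low high ans =
    if low ≤ high then
      (if PySem.Int.floordiv (low + high) 2
          - pyDigitSum (PySem.Int.floordiv (low + high) 2) < s then
        hpGo s (PySem.Int.floordiv (low + high) 2 + 1) high ans
      else hpGo s low (PySem.Int.floordiv (low + high) 2 - 1)
        (PySem.Int.floordiv (low + high) 2))
    else ans := by
  rw [hpGo]; rfl

-- int(ch) of a single decimal digit character
lemma pvDigitCharVal (d : Nat) (hd : d < 10) :
    (PySem.Int.ofChars? [Nat.digitChar d]).getD 0 = (d : Int) := by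
  interval_cases d <;> decide

-- core of Nat.toDigits in terms of Nat.digits
lemma pvToDigitsCoreEq : ∀ (f n : Nat) (l : List Char), 0 < n → n < f →
    Nat.toDigitsCore 10 f n l = ((Nat.digits 10 n).map Nat.digitChar).reverse ++ l := by
  intro f
  induction f with
  | zero => intro n l h1 h2; omega
  | succ f ih =>
    intro n l h1 h2
    rw [Nat.toDigitsCore]
    by_cases h : n / 10 = 0
    · have hn10 : n < 10 := by omega
      simp only [h, if_true]
      rw [Nat.digits_def' (by norm_num : 1 < 10) h1, h, Nat.digits_zero]
      simp [Nat.mod_eq_of_lt hn10]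
    · simp only [h, if_false]
      have hrec := ih (n / 10) (Nat.digitChar (n % 10) :: l)
        (Nat.pos_of_ne_zero h) (by omega)
      rw [hrec, Nat.digits_def' (by norm_num : 1 < 10) h1]
      simp

-- pyDigitSum on a nonnegative integer is the decimal digit sum
lemma pvDsEq (k : Nat) : pyDigitSum (k : Int) = ((Nat.digits 10 k).sum : Int) := by
  unfold pyDigitSum
  rw [show PySem.Int.toChars (k : Int) = Nat.toDigits 10 k by
    simp [PySem.Int.toChars]]
  rcases Nat.eq_zero_or_pos k with hk | hk
  · subst hk; decide
  · rw [Nat.toDigits, pvToDigitsCoreEq (k + 1) k [] hk (by omega)]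
    rw [List.append_nil, List.map_reverse, List.sum_reverse, List.map_map]
    rw [List.map_congr_left (fun d hd => by
      show (PySem.Int.ofChars? [Nat.digitChar d]).getD 0 = (Nat.cast d : Int)
      exact pvDigitCharVal d (Nat.digits_lt_base (by norm_num) hd))]
    exact (Nat.cast_list_sum (R := Int) (Nat.digits 10 k)).symm

-- digit sum grows by at most one at each successor
lemma pvSumDigitsSucc : ∀ m : Nat, (Nat.digits 10 (m + 1)).sum ≤ (Nat.digits 10 m).sum + 1 := by
  intro m
  induction m using Nat.strong_induction_on with
  | _ m ih =>
    rcases Nat.eq_zero_or_pos m with hm | hm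
    · subst hm; decide
    · rw [Nat.digits_def' (by norm_num : 1 < 10) (by omega : 0 < m + 1),
          Nat.digits_def' (by norm_num : 1 < 10) hm]
      by_cases h : m % 10 = 9
      · have h1 : (m + 1) % 10 = 0 := by omega
        have h2 : (m + 1) / 10 = m / 10 + 1 := by omega
        have h3 := ih (m / 10) (Nat.div_lt_self hm (by norm_num))
        simp only [h1, h2, List.sum_cons]
        omega
      · have h1 : (m + 1) % 10 = m % 10 + 1 := by omega
        have h2 : (m + 1) / 10 = m / 10 := by omega
        simp only [h1, h2, List.sum_cons]
        omega

-- m - digitsum(m) is monotone on naturals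
lemma pvFMono (a b : Nat) (hab : a ≤ b) :
    (a : Int) - ((Nat.digits 10 a).sum : Int) ≤ (b : Int) - ((Nat.digits 10 b).sum : Int) := by
  have step : ∀ k : Nat,
      (fun k : Nat => (k : Int) - ((Nat.digits 10 k).sum : Int)) k ≤
      (fun k : Nat => (k : Int) - ((Nat.digits 10 k).sum : Int)) (k + 1) := by
    intro k
    have := pvSumDigitsSucc k
    simp only
    omega
  exact monotone_nat_of_le_succ step hab

-- the threshold predicate is upward closed on nonnegative integers
lemma pvPMono (s m m' : Int) (h0 : 0 ≤ m) (h1 : m ≤ m')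
    (hp : s ≤ m - pyDigitSum m) : s ≤ m' - pyDigitSum m' := by
  have e : m = ((m.toNat : Nat) : Int) := (Int.toNat_of_nonneg h0).symm
  have e' : m' = ((m'.toNat : Nat) : Int) := (Int.toNat_of_nonneg (by omega)).symm
  rw [e, pvDsEq] at hp
  rw [e', pvDsEq]
  have := pvFMono m.toNat m'.toNat (by omega)
  omega

-- count of m in [low, high] with s ≤ m - digitsum m
def pvCnt (s low high : Int) : Int :=
  (((PySem.List.pyRange low (high + 1) 1).countP
    (fun m => decide (s ≤ m - pyDigitSum m)) : Nat) : Int)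

lemma pvCnt_nonneg (s low high : Int) : 0 ≤ pvCnt s low high := Int.natCast_nonneg _

lemma pvCnt_nil (s low high : Int) (h : high < low) : pvCnt s low high = 0 := by
  unfold pvCnt
  rw [PySem.List.pyRange_one_eq_nil (by omega)]
  simp

lemma pvCnt_split (s low mid high : Int) (h1 : low ≤ mid) (h2 : mid ≤ high + 1) :
    pvCnt s low high = pvCnt s low (mid - 1) + pvCnt s mid high := by
  unfold pvCnt
  rw [PySem.List.pyRange_one_append low mid (high + 1) h1 h2, List.countP_append]
  have he : mid - 1 + 1 = mid := by omega
  rw [he]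
  push_cast
  ring

lemma pvCnt_full (s low high : Int) (hlh : low ≤ high + 1)
    (h : ∀ m, low ≤ m → m ≤ high → s ≤ m - pyDigitSum m) :
    pvCnt s low high = high + 1 - low := by
  unfold pvCnt
  rw [List.countP_eq_length.mpr (fun a ha => by
    rw [PySem.List.mem_pyRange_one] at ha
    exact decide_eq_true (h a ha.1 (by omega)))]
  have hl := PySem.List.length_pyRange_one (a := low) (b := high + 1)
  omega

lemma pvCnt_zero (s low high : Int)
    (h : ∀ m, low ≤ m → m ≤ high → ¬ (s ≤ m - pyDigitSum m)) :
    pvCnt s low high = 0 := by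
  unfold pvCnt
  rw [List.countP_eq_zero.mpr (fun a ha => by
    rw [PySem.List.mem_pyRange_one] at ha
    simpa using h a ha.1 (by omega))]
  rfl

lemma pvCnt_le (s low high : Int) (hlh : low ≤ high + 1) :
    pvCnt s low high ≤ high + 1 - low := by
  unfold pvCnt
  have hc := List.countP_le_length (l := PySem.List.pyRange low (high + 1) 1)
    (p := fun m => decide (s ≤ m - pyDigitSum m))
  have hl := PySem.List.length_pyRange_one (a := low) (b := high + 1)
  omega

-- a positive count yields a witness
lemma pvCnt_pos_witness (s low high : Int) (h : 0 < pvCnt s low high) :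
    ∃ m, low ≤ m ∧ m ≤ high ∧ s ≤ m - pyDigitSum m := by
  unfold pvCnt at h
  have hpos : 0 < (PySem.List.pyRange low (high + 1) 1).countP
      (fun m => decide (s ≤ m - pyDigitSum m)) := by omega
  obtain ⟨a, ha, hpa⟩ := List.countP_pos_iff.mp hpos
  rw [PySem.List.mem_pyRange_one] at ha
  exact ⟨a, ha.1, by omega, of_decide_eq_true hpa⟩

-- A's loop computes the count in closed form
lemma pvGoEq (s : Int) (hs : 0 ≤ s) : ∀ low high ans : Int, s ≤ low →
    hpGo s low high ans =
      if pvCnt s low high = 0 then ans else high + 1 - pvCnt s low high := by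
  intro low high ans hlow
  induction low, high, ans using hpGo.induct s with
  | case1 low high ans h mid hP ih =>
    have hm : mid = (low + high) / 2 := PySem.Int.floordiv_eq_ediv_of_pos (by norm_num)
    have hb1 : low ≤ mid := by omega
    have hb2 : mid ≤ high := by omega
    rw [hpGo_eq, if_pos h,
      if_pos (show PySem.Int.floordiv (low + high) 2
        - pyDigitSum (PySem.Int.floordiv (low + high) 2) < s from hP),
      show hpGo s (PySem.Int.floordiv (low + high) 2 + 1) high ans =
        (if pvCnt s (mid + 1) high = 0 then ans
         else high + 1 - pvCnt s (mid + 1) high) from ih (by omega)]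
    have hz : pvCnt s low mid = 0 :=
      pvCnt_zero s low mid (fun m hm1 hm2 hPm =>
        (by omega : ¬ (s ≤ mid - pyDigitSum mid))
          (pvPMono s m mid (by omega) hm2 hPm))
    have hsplit := pvCnt_split s low (mid + 1) high (by omega) (by omega)
    have he : mid + 1 - 1 = mid := by omega
    rw [he] at hsplit
    rw [hsplit, hz]
    simp
  | case2 low high ans h mid hP ih =>
    have hm : mid = (low + high) / 2 := PySem.Int.floordiv_eq_ediv_of_pos (by norm_num)
    have hb1 : low ≤ mid := by omega
    have hb2 : mid ≤ high := by omega
    rw [hpGo_eq, if_pos h,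
      if_neg (show ¬ (PySem.Int.floordiv (low + high) 2
        - pyDigitSum (PySem.Int.floordiv (low + high) 2) < s) from hP),
      show hpGo s low (PySem.Int.floordiv (low + high) 2 - 1)
          (PySem.Int.floordiv (low + high) 2) =
        (if pvCnt s low (mid - 1) = 0 then mid
         else (mid - 1) + 1 - pvCnt s low (mid - 1)) from ih hlow]
    have hP' : s ≤ mid - pyDigitSum mid := by omega
    have hfull : pvCnt s mid high = high + 1 - mid :=
      pvCnt_full s mid high (by omega)
        (fun m hm1 hm2 => pvPMono s mid m (by omega) hm1 hP')
    have hsplit := pvCnt_split s low mid high (by omega) (by omega)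
    have hnn := pvCnt_nonneg s low (mid - 1)
    rw [hsplit, hfull]
    split_ifs <;> omega
  | case3 low high ans h =>
    rw [hpGo_eq, if_neg h, pvCnt_nil s low high (by omega)]
    simp

-- B's loop lands on the first threshold point, in closed form
lemma pvAltEq (n s : Int) (hs : 0 ≤ s) : ∀ t : Int, s ≤ t →
    altGo n s t = if pvCnt s t n = 0 then max t (n + 1) else n + 1 - pvCnt s t n := by
  intro t ht
  induction t using altGo.induct n s with
  | case1 t h ih =>
    rw [altGo, dif_pos h, ih (by omega)]
    have hz : pvCnt s t t = 0 :=
      pvCnt_zero s t t (fun m hm1 hm2 hPm => by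
        have hmt : m = t := by omega
        rw [hmt] at hPm
        omega)
    have hsplit := pvCnt_split s t (t + 1) n (by omega) (by omega)
    have he : t + 1 - 1 = t := by omega
    rw [he] at hsplit
    rw [hsplit, hz]
    simp [show max (t + 1) (n + 1) = n + 1 by omega, show max t (n + 1) = n + 1 by omega]
  | case2 t h =>
    rw [altGo, dif_neg h]
    rcases not_and_or.mp h with hn | hP
    · rw [pvCnt_nil s t n (by omega), if_pos rfl]
      omega
    · have hP' : s ≤ t - pyDigitSum t := by omega
      by_cases hn : t ≤ n
      · rw [pvCnt_full s t n (by omega)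
          (fun m hm1 hm2 => pvPMono s t m (by omega) hm1 hP'),
          if_neg (by omega)]
        omega
      · rw [pvCnt_nil s t n (by omega), if_pos rfl]
        omega

-- ===== VERDICT (by name: the statement is the Claim_ definition above) =====
theorem hnbhai_param_spec : Claim_equal_hnbhai_param := by
  intro n s _ hpre
  unfold Spec_hnbhai_param
  by_cases hs : 0 ≤ s
  · -- main case: every mid either loop looks at is nonnegative
    unfold hnbhai_param hnbhai_param_alt
    show n - hpGo s s (n + 1) (n + 1) + 1 =
      if altGo n s s ≤ n then n - altGo n s s + 1 else 0
    rw [pvGoEq s hs s (n + 1) (n + 1) le_rfl, pvAltEq n s hs s le_rfl]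
    by_cases hsn : s ≤ n + 1
    · have hsplit := pvCnt_split s s (n + 1) (n + 1) hsn (by omega)
      have he : n + 1 - 1 = n := by omega
      rw [he] at hsplit
      have hnn0 := pvCnt_nonneg s s n
      have hnn1 := pvCnt_nonneg s (n + 1) (n + 1)
      have hle1 := pvCnt_le s (n + 1) (n + 1) (by omega)
      have himp : 0 < pvCnt s s n → pvCnt s (n + 1) (n + 1) = 1 := by
        intro hpos
        obtain ⟨m, hm1, hm2, hm3⟩ := pvCnt_pos_witness s s n hpos
        have hPn1 : s ≤ (n + 1) - pyDigitSum (n + 1) :=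
          pvPMono s m (n + 1) (by omega) (by omega) hm3
        rw [pvCnt_full s (n + 1) (n + 1) (by omega)
          (fun m' hm1' hm2' => by
            have hmn : m' = n + 1 := by omega
            rw [hmn]; exact hPn1)]
        omega
      split_ifs at * <;> omega
    · rw [pvCnt_nil s s n (by omega), pvCnt_nil s s (n + 1) (by omega)]
      split_ifs <;> omega
  · -- Pre_ forces n + 1 < s: neither loop body ever runs
    have hns : n + 1 < s := by
      rcases hpre with h | h
      · omega
      · exact h
    unfold hnbhai_param hnbhai_param_alt
    show n - hpGo s s (n + 1) (n + 1) + 1 =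
      if altGo n s s ≤ n then n - altGo n s s + 1 else 0
    rw [hpGo_eq, if_neg (by omega : ¬ (s ≤ n + 1)),
      altGo, dif_neg (by
        intro hc
        exact absurd hc.1 (by omega))]
    rw [if_neg (by omega : ¬ (s ≤ n))]
    omega
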